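-- pv_equiv track=rewrite | github.com/huythedev/Sigma_Judge | app/core/modules/test_runner.py | _compare_output
-- ===== SOURCE A (Python) =====
-- def _compare_output(actual: str, expected: str) -> bool:
--     """Compare actual and expected output, ignoring whitespace differences"""
--     actual_lines = actual.strip().split('\n')
--     expected_lines = expected.strip().split('\n')
--
--     if len(actual_lines) != len(expected_lines):
--         return False
--
--     for a_line, e_line in zip(actual_lines, expected_lines):
--         if a_line.strip() != e_line.strip():
--             return False
--
--     return True
-- ===== SOURCE B (Python) =====
-- def _normalize(s: str) -> str:
--     return '\n'.join(line.strip() for line in s.strip().split('\n'))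
--
-- def _compare_output(actual: str, expected: str) -> bool:
--     return _normalize(actual) == _normalize(expected)
-- ===== Notes on version B (the rewrite author's own statement) =====
-- stated objective: simpler
-- what changed: Replaces the length guard plus early-exit per-line comparison loop with a build-then-compare: each string is normalized to one canonical string (strip, split lines, strip each line, rejoin) and the two canonical strings are compared with ==.
import Mathlib
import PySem

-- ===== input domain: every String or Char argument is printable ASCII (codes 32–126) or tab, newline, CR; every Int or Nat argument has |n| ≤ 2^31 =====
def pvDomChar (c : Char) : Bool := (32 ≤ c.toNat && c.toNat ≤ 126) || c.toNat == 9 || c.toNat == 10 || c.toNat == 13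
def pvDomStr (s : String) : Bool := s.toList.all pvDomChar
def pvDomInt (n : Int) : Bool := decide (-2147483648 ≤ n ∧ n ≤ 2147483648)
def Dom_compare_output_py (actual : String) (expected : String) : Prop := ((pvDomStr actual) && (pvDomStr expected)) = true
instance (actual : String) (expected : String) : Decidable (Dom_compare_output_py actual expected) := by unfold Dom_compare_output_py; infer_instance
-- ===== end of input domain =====

-- B replaces A's length guard + early-exit per-line loop with a build-then-compare of one
-- canonical normalized string per input (objective: simpler).

-- shared primitive wrapper: s.split('\n') (separator is non-empty, so split? is some)
def pySplitNL (s : String) : List String := (PySem.Str.split? s "\n").getD []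

-- ===== PORT A =====
-- the 'for a_line, e_line in zip(...)' loop with its early 'return False'
def cmpLoop : List (String × String) → Bool
  | [] => true
  | (a, e) :: rest =>
      if PySem.Str.strip a ≠ PySem.Str.strip e then false else cmpLoop rest

def compare_output_py (actual : String) (expected : String) : Bool :=
  let actual_lines := pySplitNL (PySem.Str.strip actual)
  let expected_lines := pySplitNL (PySem.Str.strip expected)
  if actual_lines.length ≠ expected_lines.length then false
  else cmpLoop (actual_lines.zip expected_lines)

-- ===== PORT B =====
def pyNormalize (s : String) : String :=
  PySem.Str.join "\n" ((pySplitNL (PySem.Str.strip s)).map PySem.Str.strip)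

def compare_output_py_alt (actual : String) (expected : String) : Bool :=
  pyNormalize actual == pyNormalize expected

-- ===== PRECONDITION & SPEC =====
def Spec_compare_output_py (actual : String) (expected : String) (out : Bool) : Prop := out = compare_output_py_alt actual expected
instance (actual : String) (expected : String) (out : Bool) : Decidable (Spec_compare_output_py actual expected out) := by unfold Spec_compare_output_py; infer_instance

-- ===== CLAIM (what is proved, stated in full; the proofs are below) =====
def Claim_equal_compare_output_py : Prop := ∀ (actual : String) (expected : String), Dom_compare_output_py actual expected → Spec_compare_output_py actual expected (compare_output_py actual expected)

-- ===== LEMMAS AND PROOFS =====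

-- splitOn.go never returns the empty list
theorem go_ne_nil (sep : List Char) : ∀ (fuel : Nat) (l cur : List Char) (acc : List (List Char)),
    PySem.Chars.splitOn.go sep fuel l cur acc ≠ [] := by
  intro fuel
  induction fuel with
  | zero => intro l cur acc; simp [PySem.Chars.splitOn.go]
  | succ n ih =>
    intro l cur acc
    cases l with
    | nil => simp [PySem.Chars.splitOn.go]
    | cons c rest =>
      by_cases h : sep.isPrefixOf (c :: rest) = true
      · simpa [PySem.Chars.splitOn.go, h] using ih _ _ _
      · simpa [PySem.Chars.splitOn.go, h] using ih _ _ _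

theorem splitOn_ne_nil (s sep : List Char) : PySem.Chars.splitOn s sep ≠ [] := by
  simpa [PySem.Chars.splitOn] using go_ne_nil sep (s.length + 1) s [] []

-- with separator [c], no piece produced by go contains c
theorem go_no_sep (c : Char) : ∀ (fuel : Nat) (l cur : List Char) (acc : List (List Char)),
    l.length < fuel → c ∉ cur → (∀ p ∈ acc, c ∉ p) →
    ∀ p ∈ PySem.Chars.splitOn.go [c] fuel l cur acc, c ∉ p := by
  intro fuel
  induction fuel with
  | zero => intro l cur acc hlt; omega
  | succ n ih =>
    intro l cur acc hlt hcur hacc p hp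
    cases l with
    | nil =>
      simp only [PySem.Chars.splitOn.go, List.mem_reverse, List.mem_cons] at hp
      rcases hp with h | h
      · subst h; simpa using hcur
      · exact hacc p h
    | cons c' rest =>
      by_cases hpre : c' = c
      · subst hpre
        have hgo : PySem.Chars.splitOn.go [c'] (n+1) (c'::rest) cur acc
            = PySem.Chars.splitOn.go [c'] n rest [] (cur.reverse :: acc) := by
          simp [PySem.Chars.splitOn.go, List.isPrefixOf]
        rw [hgo] at hp
        refine ih rest [] _ (by simp at hlt ⊢; omega) (by simp) ?_ p hp
        intro q hq
        rcases List.mem_cons.mp hq with h | h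
        · subst h; simpa using hcur
        · exact hacc q h
      · have hgo : PySem.Chars.splitOn.go [c] (n+1) (c'::rest) cur acc
            = PySem.Chars.splitOn.go [c] n rest (c' :: cur) acc := by
          simp only [PySem.Chars.splitOn.go, List.isPrefixOf]
          rw [if_neg]
          simp only [Bool.and_eq_true, beq_iff_eq]
          intro h; exact hpre h.1.symm
        rw [hgo] at hp
        refine ih rest (c' :: cur) acc (by simp at hlt ⊢; omega) ?_ hacc p hp
        intro h
        rcases List.mem_cons.mp h with h | h
        · exact hpre h.symm
        · exact hcur h

theorem splitOn_no_sep (s : List Char) (c : Char) :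
    ∀ p ∈ PySem.Chars.splitOn s [c], c ∉ p := by
  simpa [PySem.Chars.splitOn] using
    go_no_sep c (s.length + 1) s [] [] (by omega) (by simp) (by simp)

-- strip only drops characters
theorem mem_strip {x : Char} {s : List Char} (h : x ∈ PySem.Chars.strip s) : x ∈ s := by
  simp only [PySem.Chars.strip, PySem.Chars.rstrip, PySem.Chars.lstrip, List.mem_reverse] at h
  have h1 := (List.dropWhile_sublist (l := (List.dropWhile PySem.Chars.isspace s).reverse)
    (p := PySem.Chars.isspace)).mem h
  rw [List.mem_reverse] at h1
  exact (List.dropWhile_sublist (l := s) (p := PySem.Chars.isspace)).mem h1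

-- splitting an appended pair at the first occurrence of a separator char is unambiguous
theorem sep_split_unique (c : Char) : ∀ (a b u v : List Char), c ∉ a → c ∉ b →
    a ++ c :: u = b ++ c :: v → a = b ∧ u = v := by
  intro a
  induction a with
  | nil =>
    intro b u v _ hb h
    cases b with
    | nil => simpa using h
    | cons b0 bs =>
      simp only [List.nil_append, List.cons_append, List.cons.injEq] at h
      exact absurd (h.1 ▸ List.mem_cons_self (a := b0) (l := bs)) hb
  | cons a0 as ih =>
    intro b u v ha hb h
    cases b with
    | nil =>
      simp only [List.cons_append, List.nil_append, List.cons.injEq] at h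
      exact absurd (h.1.symm ▸ List.mem_cons_self (a := a0) (l := as)) ha
    | cons b0 bs =>
      simp only [List.cons_append, List.cons.injEq] at h
      obtain ⟨hab, hu⟩ := ih bs u v (fun hx => ha (List.mem_cons_of_mem _ hx))
        (fun hx => hb (List.mem_cons_of_mem _ hx)) h.2
      exact ⟨by simp [h.1, hab], hu⟩

-- join with a single separator char is injective on nonempty lists of sep-free pieces
theorem join_inj (c : Char) : ∀ (xs ys : List (List Char)), xs ≠ [] → ys ≠ [] →
    (∀ p ∈ xs, c ∉ p) → (∀ p ∈ ys, c ∉ p) →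
    PySem.Chars.join [c] xs = PySem.Chars.join [c] ys → xs = ys := by
  intro xs
  induction xs with
  | nil => intro ys h; exact absurd rfl h
  | cons x xt ih =>
    intro ys _ hys hx hy h
    cases ys with
    | nil => exact absurd rfl hys
    | cons y yt =>
      cases xt with
      | nil =>
        cases yt with
        | nil => simpa [PySem.Chars.join_singleton] using h
        | cons y1 yr =>
          rw [PySem.Chars.join_singleton, PySem.Chars.join_cons_cons] at h
          exfalso
          refine hx x (by simp) ?_
          rw [h]; simp
      | cons x1 xr =>
        cases yt with
        | nil =>
          rw [PySem.Chars.join_singleton, PySem.Chars.join_cons_cons] at h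
          exfalso
          refine hy y (by simp) ?_
          rw [← h]; simp
        | cons y1 yr =>
          rw [PySem.Chars.join_cons_cons, PySem.Chars.join_cons_cons] at h
          rw [List.append_assoc, List.append_assoc] at h
          obtain ⟨hxy, htail⟩ := sep_split_unique c x y _ _ (hx x (by simp)) (hy y (by simp)) (by simpa using h)
          have := ih (y1 :: yr) (by simp) (by simp)
            (fun p hp => hx p (List.mem_cons_of_mem _ hp))
            (fun p hp => hy p (List.mem_cons_of_mem _ hp)) htail
          rw [hxy, this]

-- the early-exit loop over the zip equals list equality of stripped lines (equal lengths)
theorem cmpLoop_eq : ∀ (xs ys : List String), xs.length = ys.length →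
    cmpLoop (xs.zip ys) = decide (xs.map PySem.Str.strip = ys.map PySem.Str.strip) := by
  intro xs
  induction xs with
  | nil => intro ys h; cases ys <;> simp_all [cmpLoop]
  | cons x xt ih =>
    intro ys h
    cases ys with
    | nil => simp at h
    | cons y yt =>
      simp only [List.zip_cons_cons, cmpLoop, List.map_cons]
      by_cases hxy : PySem.Str.strip x = PySem.Str.strip y
      · simp [hxy, ih yt (by simpa using h)]
      · simp [hxy]

-- string == is decide of equality
theorem strBeq_eq_decide (a b : String) : (a == b) = decide (a = b) := by
  rcases Bool.eq_false_or_eq_true (a == b) with h | h <;> simp_all [beq_iff_eq]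

-- pieces of pySplitNL (Str.strip s), once stripped, contain no '\n' (as char lists)
theorem pieces_no_nl (s : String) :
    ∀ p ∈ (pySplitNL s).map PySem.Str.strip, '\n' ∉ p.toList := by
  intro p hp
  simp only [pySplitNL, PySem.Str.split?, PySem.Chars.split?] at hp
  rw [if_neg (by decide)] at hp
  simp only [Option.map_some, Option.getD_some, List.map_map, List.mem_map] at hp
  obtain ⟨q, hq, hpq⟩ := hp
  intro hmem
  rw [← hpq] at hmem
  simp only [Function.comp, PySem.Str.strip] at hmem
  have h1 : '\n' ∈ PySem.Chars.strip ((String.ofList q).toList) := by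
    simpa [PySem.Chars.strip] using hmem
  rw [String.toList_ofList] at h1
  exact splitOn_no_sep s.toList '\n' q hq (mem_strip h1)

-- the split lists are nonempty
theorem pySplitNL_ne_nil (s : String) : pySplitNL s ≠ [] := by
  simp only [pySplitNL, PySem.Str.split?, PySem.Chars.split?]
  rw [if_neg (by decide)]
  simp only [Option.map_some, Option.getD_some, ne_eq, List.map_eq_nil_iff]
  exact splitOn_ne_nil _ _

-- normalized strings are equal iff the stripped line lists are equal
theorem normalize_eq_iff (a e : String) :
    (pyNormalize a = pyNormalize e) ↔
      ((pySplitNL (PySem.Str.strip a)).map PySem.Str.strip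
        = (pySplitNL (PySem.Str.strip e)).map PySem.Str.strip) := by
  constructor
  · intro h
    simp only [pyNormalize, PySem.Str.join] at h
    have h2 : PySem.Chars.join ['\n']
        (((pySplitNL (PySem.Str.strip a)).map PySem.Str.strip).map String.toList)
      = PySem.Chars.join ['\n']
        (((pySplitNL (PySem.Str.strip e)).map PySem.Str.strip).map String.toList) := by
      have hsep : "\n".toList = ['\n'] := by decide
      have h3 := congrArg String.toList h
      simp only [String.toList_ofList, hsep] at h3
      exact h3
    have hnea : ((pySplitNL (PySem.Str.strip a)).map PySem.Str.strip).map String.toList ≠ [] := by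
      simp only [ne_eq, List.map_eq_nil_iff]
      exact pySplitNL_ne_nil _
    have hnee : ((pySplitNL (PySem.Str.strip e)).map PySem.Str.strip).map String.toList ≠ [] := by
      simp only [ne_eq, List.map_eq_nil_iff]
      exact pySplitNL_ne_nil _
    have hlists := join_inj '\n' _ _ hnea hnee
      (by intro p hp; obtain ⟨q, hq, rfl⟩ := List.mem_map.mp hp; exact pieces_no_nl (PySem.Str.strip a) q hq)
      (by intro p hp; obtain ⟨q, hq, rfl⟩ := List.mem_map.mp hp; exact pieces_no_nl (PySem.Str.strip e) q hq)
      h2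
    exact List.map_injective_iff.mpr (fun u v huv => by
      simpa using congrArg String.ofList huv) hlists
  · intro h; simp [pyNormalize, h]

-- A's guarded loop computes list equality of the stripped lines
theorem portA_eq (a e : String) : compare_output_py a e
    = decide ((pySplitNL (PySem.Str.strip a)).map PySem.Str.strip
        = (pySplitNL (PySem.Str.strip e)).map PySem.Str.strip) := by
  unfold compare_output_py
  by_cases hlen : (pySplitNL (PySem.Str.strip a)).length = (pySplitNL (PySem.Str.strip e)).length
  · rw [if_neg (by omega), cmpLoop_eq _ _ hlen]
  · rw [if_pos hlen]
    have h : (pySplitNL (PySem.Str.strip a)).map PySem.Str.strip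
        ≠ (pySplitNL (PySem.Str.strip e)).map PySem.Str.strip := by
      intro h; exact hlen (by simpa using congrArg List.length h)
    simp [h]

-- ===== VERDICT (by name: the statement is the Claim_ definition above) =====
theorem compare_output_py_spec : Claim_equal_compare_output_py := by
  intro actual expected _
  show compare_output_py actual expected = compare_output_py_alt actual expected
  rw [portA_eq]
  unfold compare_output_py_alt
  rw [strBeq_eq_decide]
  exact decide_eq_decide.mpr (Iff.symm (normalize_eq_iff actual expected))
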